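-- pv_equiv track=rewrite | github.com/Factories-git/DFS_and_BFS | 석유 시추 (PCCP 기출) [프로그래머스].py | solution
-- ===== SOURCE A (Python) =====
-- def solution(land):
--     def dfs(g, x, y):
--         dx = [-1, 0, 1, 0]
--         dy = [0, -1, 0, 1]
--         count = 1
--         if x <= -1 or x >= len(g) or y <= -1 or y >= len(g[0]):
--             return 0
--         if g[x][y] == 1:
--             for i in range(4):
--                 nx = x + dx[i]
--                 ny = y + dy[i]
--                 if (nx, ny) not in visit:
--                     visit.add((nx, ny))
--                     count += dfs(g, nx, ny)
--         return count if g[x][y] == 1 else 0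
--
--     ans_c = -1
--     for i in range(len(land[0])):
--         c = 0
--         visit = set()
--         for j in range(len(land)):
--             if land[j][i] == 1:
--                 dfs_re = dfs(land, j, i) - 1
--                 c += dfs_re
--                 if dfs_re == 0 and not (j, i) in visit:
--                     c += 1
--                 visit.add((j, i))
--         ans_c = max(c, ans_c)
--     return ans_c
-- ===== SOURCE B (Python) =====
-- def solution(land):
--     H = len(land)
--     W = len(land[0])
--     best = -1
--     for i in range(W):
--         S = {(j, i) for j in range(H) if land[j][i] == 1}
--         while True:
--             T = S | {(x + dx, y + dy) for (x, y) in S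
--                      for (dx, dy) in ((-1, 0), (1, 0), (0, -1), (0, 1))
--                      if 0 <= x + dx < H and 0 <= y + dy < W and land[x + dx][y + dy] == 1}
--             if T == S:
--                 break
--             S = T
--         best = max(best, len(S))
--     return best
-- ===== Notes on version B (the rewrite author's own statement) =====
-- stated objective: alternative
-- what changed: Per-column recursive DFS with a shared visited set and +1/-1 count corrections is replaced by whole-column set saturation: the column's oil cells are expanded to a fixed point all at once and the answer is the size of that fixed point.
import Mathlib
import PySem

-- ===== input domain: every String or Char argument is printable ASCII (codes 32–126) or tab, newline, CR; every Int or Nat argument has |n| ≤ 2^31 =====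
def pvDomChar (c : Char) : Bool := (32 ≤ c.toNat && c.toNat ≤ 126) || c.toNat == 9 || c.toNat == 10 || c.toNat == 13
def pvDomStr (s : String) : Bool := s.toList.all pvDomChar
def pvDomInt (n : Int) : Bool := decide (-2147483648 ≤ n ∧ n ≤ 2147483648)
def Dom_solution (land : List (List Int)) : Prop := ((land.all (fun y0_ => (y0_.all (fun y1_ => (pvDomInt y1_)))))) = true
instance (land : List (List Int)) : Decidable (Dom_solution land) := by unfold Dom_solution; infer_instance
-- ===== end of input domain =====

-- B replaces A's per-cell recursive DFS (restarted for every cell of every column, with a shared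
-- visited set and -1/+1 count corrections) by whole-column set saturation: all oil cells of a column
-- are expanded to a fixed point at once and the column's value is the size of that fixed point.
-- Objective: alternative algorithm (not measured faster). A mutates nothing observable.

-- ===== PORT A =====

def cellA (g : List (List Int)) (x y : Int) : Option Int :=
  (PySem.List.pyGet? g x).bind fun row => PySem.List.pyGet? row y

def dirsA : List (Int × Int) := [(-1, 0), (0, -1), (1, 0), (0, 1)]

def boxA (g : List (List Int)) : List (Int × Int) :=
  (PySem.List.pyRange (-1) ((g.length : Int) + 1) 1) ×ˢ
    (PySem.List.pyRange (-1) (((g.headD []).length : Int) + 1) 1)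

def freeA (g : List (List Int)) (v : List (Int × Int)) : Nat :=
  (boxA g).countP fun p => decide (p ∉ v)

theorem mem_boxA (g : List (List Int)) (p : Int × Int)
    (h1 : -1 ≤ p.1) (h2 : p.1 ≤ (g.length : Int))
    (h3 : -1 ≤ p.2) (h4 : p.2 ≤ ((g.headD []).length : Int)) : p ∈ boxA g := by
  obtain ⟨a, b⟩ := p
  simp only at h1 h2 h3 h4
  unfold boxA
  rw [SProd.sprod, List.instSProd, List.pair_mem_product]
  constructor <;> rw [PySem.List.mem_pyRange_one] <;> omega

theorem freeA_le_of_prefix (g : List (List Int)) (v w : List (Int × Int))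
    (h : v <+: w) : freeA g w ≤ freeA g v := by
  apply List.countP_mono_left
  intro a _ ha
  simp only [decide_eq_true_eq] at *
  exact fun hv => ha (h.subset hv)

theorem freeA_append_lt (g : List (List Int)) (v : List (Int × Int)) (p : Int × Int)
    (hbox : p ∈ boxA g) (hp : p ∉ v) : freeA g (v ++ [p]) < freeA g v := by
  unfold freeA
  have hgen : ∀ l : List (Int × Int), p ∈ l →
      l.countP (fun x => decide (x ∉ v ++ [p])) < l.countP (fun x => decide (x ∉ v)) := by
    intro l hl
    induction l with
    | nil => simp at hl
    | cons a t ih =>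
      have hpt : ∀ (x : Int × Int),
          (if decide (x ∉ v ++ [p]) = true then 1 else 0) ≤ (if decide (x ∉ v) = true then 1 else 0) := by
        intro x
        by_cases hx : x ∈ v
        · simp [hx]
        · simp [hx, List.mem_append]
          split <;> omega
      have hmono : t.countP (fun x => decide (x ∉ v ++ [p])) ≤ t.countP (fun x => decide (x ∉ v)) := by
        apply List.countP_mono_left
        intro x _ hx
        simp only [decide_eq_true_eq, List.mem_append] at *
        tauto
      rcases List.mem_cons.1 hl with rfl | hat
      · simp only [List.countP_cons]
        have h1 : (decide (p ∉ v ++ [p])) = false := by simp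
        have h2 : (decide (p ∉ v)) = true := by simpa using hp
        rw [h1, h2]
        have e1 : (if (false : Bool) = true then 1 else 0) = 0 := rfl
        have e2 : (if (true : Bool) = true then 1 else 0) = 1 := rfl
        rw [e1, e2]
        omega
      · have := ih hat
        simp only [List.countP_cons]
        have := hpt a
        omega
  exact hgen (boxA g) hbox

mutual
def dfsA (g : List (List Int)) (x y : Int) (v : PySem.Set (Int × Int)) :
    {r : Int × PySem.Set (Int × Int) // v <+: r.2} :=
  if h : x ≤ -1 ∨ x ≥ (g.length : Int) ∨ y ≤ -1 ∨ y ≥ ((g.headD []).length : Int) then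
    ⟨(0, v), List.prefix_refl v⟩
  else if cellA g x y = some 1 then
    dfsLoopA g x y (by omega) dirsA (fun d hd => hd) 1 v
  else ⟨(0, v), List.prefix_refl v⟩
termination_by freeA g v * 5 + 5
decreasing_by simp [dirsA]

def dfsLoopA (g : List (List Int)) (x y : Int)
    (hin : 0 ≤ x ∧ x < (g.length : Int) ∧ 0 ≤ y ∧ y < ((g.headD []).length : Int))
    (ds : List (Int × Int)) (hds : ∀ d ∈ ds, d ∈ dirsA) (c : Int)
    (v : PySem.Set (Int × Int)) : {r : Int × PySem.Set (Int × Int) // v <+: r.2} :=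
  match ds, hds with
  | [], _ => ⟨(c, v), List.prefix_refl v⟩
  | d :: rest, hds =>
    if hmem : (x + d.1, y + d.2) ∈ v then
      dfsLoopA g x y hin rest (fun e he => hds e (List.mem_cons_of_mem d he)) c v
    else
      have h1 : v <+: v ++ [(x + d.1, y + d.2)] := List.prefix_append v _
      match dfsA g (x + d.1) (y + d.2) (v ++ [(x + d.1, y + d.2)]) with
      | ⟨(c2, v2), h2⟩ =>
        match dfsLoopA g x y hin rest (fun e he => hds e (List.mem_cons_of_mem d he)) (c + c2) v2 with
        | ⟨r, h3⟩ => ⟨r, h1.trans (h2.trans h3)⟩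
termination_by freeA g v * 5 + ds.length
decreasing_by
  · simp only [List.length_cons]
    omega
  · have hd := hds d (List.mem_cons_self ..)
    have hb : (x + d.1, y + d.2) ∈ boxA g := by
      simp only [dirsA, List.mem_cons, List.not_mem_nil, or_false] at hd
      rcases hd with rfl | rfl | rfl | rfl <;> (apply mem_boxA <;> simp only <;> omega)
    have := freeA_append_lt g v _ hb hmem
    simp only [List.length_cons]
    omega
  · have hd := hds d (List.mem_cons_self ..)
    have hb : (x + d.1, y + d.2) ∈ boxA g := by
      simp only [dirsA, List.mem_cons, List.not_mem_nil, or_false] at hd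
      rcases hd with rfl | rfl | rfl | rfl <;> (apply mem_boxA <;> simp only <;> omega)
    have hlt := freeA_append_lt g v _ hb hmem
    have hle : freeA g v2 ≤ freeA g (v ++ [(x + d.1, y + d.2)]) := freeA_le_of_prefix g _ _ h2
    simp only [List.length_cons]
    omega
end

def rowStepA (g : List (List Int)) (i : Int) (st : Int × PySem.Set (Int × Int)) (j : Int) :
    Int × PySem.Set (Int × Int) :=
  if cellA g j i = some 1 then
    let r := dfsA g j i st.2
    let re := r.val.1 - 1
    let c1 := st.1 + re
    let c2 := if re = 0 ∧ (j, i) ∉ r.val.2 then c1 + 1 else c1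
    (c2, PySem.Set.add r.val.2 (j, i))
  else st

def solution (land : List (List Int)) : Int :=
  (PySem.List.pyRange 0 ((land.headD []).length : Int) 1).foldl
    (fun ans i =>
      let st := (PySem.List.pyRange 0 (land.length : Int) 1).foldl (rowStepA land i) (0, PySem.Set.empty)
      max st.1 ans)
    (-1)

-- ===== PORT B =====

def dirsB : List (Int × Int) := [(-1, 0), (1, 0), (0, -1), (0, 1)]

def oilB (land : List (List Int)) (x y : Int) : Bool :=
  decide (0 ≤ x) && decide (x < (land.length : Int)) && decide (0 ≤ y) &&
  decide (y < ((land.headD []).length : Int)) && (cellA land x y == some 1)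

def gridB (land : List (List Int)) : List (Int × Int) :=
  (PySem.List.pyRange 0 (land.length : Int) 1) ×ˢ
    (PySem.List.pyRange 0 ((land.headD []).length : Int) 1)

def freeB (land : List (List Int)) (S : List (Int × Int)) : Nat :=
  (gridB land).countP fun p => decide (p ∉ S)

def expandB (land : List (List Int)) (S : PySem.Set (Int × Int)) : PySem.Set (Int × Int) :=
  PySem.Set.union S (S.flatMap fun p => dirsB.filterMap fun d =>
    if oilB land (p.1 + d.1) (p.2 + d.2) then some (p.1 + d.1, p.2 + d.2) else none)

theorem countP_lt_of_mono {α : Type} (l : List α) (q r : α → Bool)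
    (hmono : ∀ a, q a = true → r a = true) (a : α) (ha : a ∈ l)
    (hq : q a = false) (hr : r a = true) : l.countP q < l.countP r := by
  induction l with
  | nil => simp at ha
  | cons b t ih =>
    have hb : (if q b = true then 1 else 0) ≤ (if r b = true then 1 else 0) := by
      by_cases hqb : q b = true
      · simp [hqb, hmono b hqb]
      · simp [hqb]
    have hmt : t.countP q ≤ t.countP r := List.countP_mono_left (fun x _ => hmono x)
    rcases List.mem_cons.1 ha with rfl | hat
    · simp only [List.countP_cons, hq, hr]
      have e1 : (if (false : Bool) = true then 1 else 0) = 0 := rfl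
      have e2 : (if (true : Bool) = true then 1 else 0) = 1 := rfl
      simp only [if_true, decide_true, if_pos]
      omega
    · have := ih hat
      simp only [List.countP_cons]
      omega

theorem mem_gridB (land : List (List Int)) (p : Int × Int)
    (h1 : 0 ≤ p.1) (h2 : p.1 < (land.length : Int))
    (h3 : 0 ≤ p.2) (h4 : p.2 < ((land.headD []).length : Int)) : p ∈ gridB land := by
  obtain ⟨a, b⟩ := p
  simp only at h1 h2 h3 h4
  unfold gridB
  rw [SProd.sprod, List.instSProd, List.pair_mem_product]
  constructor <;> rw [PySem.List.mem_pyRange_one] <;> omega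

theorem satB_dec (land : List (List Int)) (S : PySem.Set (Int × Int))
    (h : PySem.Set.equal (expandB land S) S = false) :
    freeB land (expandB land S) < freeB land S := by
  have hsub : ∀ x ∈ S, x ∈ expandB land S := by
    intro x hx
    exact (PySem.Set.mem_union ..).mpr (Or.inl hx)
  have hx : ∃ x ∈ expandB land S, x ∉ S := by
    by_contra hc
    push_neg at hc
    have : PySem.Set.equal (expandB land S) S = true :=
      (PySem.Set.equal_iff ..).mpr (fun x => ⟨fun hxT => hc x hxT, fun hxS => hsub x hxS⟩)
    rw [this] at h
    exact absurd h (by simp)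
  obtain ⟨x, hxT, hxS⟩ := hx
  have hgrid : x ∈ gridB land := by
    rcases (PySem.Set.mem_union ..).mp hxT with hS | hnew
    · exact absurd hS hxS
    · obtain ⟨p, _, hd⟩ := List.mem_flatMap.mp hnew
      obtain ⟨d, _, hfd⟩ := List.mem_filterMap.mp hd
      by_cases ho : oilB land (p.1 + d.1) (p.2 + d.2) = true
      · rw [if_pos ho] at hfd
        obtain rfl := Option.some_injective _ hfd
        simp only [oilB, Bool.and_eq_true, decide_eq_true_eq] at ho
        exact mem_gridB land _ ho.1.1.1.1 ho.1.1.1.2 ho.1.1.2 ho.1.2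
      · rw [if_neg ho] at hfd
        simp at hfd
  apply countP_lt_of_mono (gridB land) _ _ ?_ x hgrid (by simpa using hxT) (by simpa using hxS)
  intro a ha
  simp only [decide_eq_true_eq] at *
  exact fun hv => ha (hsub a hv)

def satB (land : List (List Int)) (S : PySem.Set (Int × Int)) : PySem.Set (Int × Int) :=
  let T := expandB land S
  if PySem.Set.equal T S then S else satB land T
termination_by freeB land S
decreasing_by
  rename_i hne
  simp only [Bool.not_eq_true] at hne
  exact satB_dec land S hne

def colStartB (land : List (List Int)) (i : Int) : PySem.Set (Int × Int) :=
  PySem.Set.ofList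
    (((PySem.List.pyRange 0 (land.length : Int) 1).filter fun j => cellA land j i == some 1).map
      fun j => (j, i))

def solution_alt (land : List (List Int)) : Int :=
  (PySem.List.pyRange 0 ((land.headD []).length : Int) 1).foldl
    (fun best i => max best ((satB land (colStartB land i)).length : Int)) (-1)

-- ===== PRECONDITION & SPEC =====
-- Pre_solution is exactly the inputs where the Python A returns normally: a nonempty grid whose
-- rows are all at least as long as the first row (otherwise land[0] / land[j][i] raises IndexError).
def Pre_solution (land : List (List Int)) : Prop :=
  land ≠ [] ∧ ∀ row ∈ land, (land.headD []).length ≤ row.length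
instance (land : List (List Int)) : Decidable (Pre_solution land) := by unfold Pre_solution; infer_instance

def pvWitness_solution : List (List Int) := [[1, 0], [1, 1]]

def Spec_solution (land : List (List Int)) (out : Int) : Prop := out = solution_alt land
instance (land : List (List Int)) (out : Int) : Decidable (Spec_solution land out) := by unfold Spec_solution; infer_instance

-- ===== CLAIM (what is proved, stated in full; the proofs are below) =====
def Claim_equal_solution : Prop := ∀ (land : List (List Int)), Dom_solution land → Pre_solution land → Spec_solution land (solution land)

-- ===== LEMMAS AND PROOFS =====

-- The common semantic layer: oil cells, 4-adjacency, reachability.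
def Oil (g : List (List Int)) (p : Int × Int) : Prop := oilB g p.1 p.2 = true

def AdjP (p q : Int × Int) : Prop := (q.1 - p.1, q.2 - p.2) ∈ dirsA

def StepP (g : List (List Int)) (p q : Int × Int) : Prop := Oil g p ∧ Oil g q ∧ AdjP p q

def ReachP (g : List (List Int)) : (Int × Int) → (Int × Int) → Prop :=
  Relation.ReflTransGen (StepP g)

-- A's dfs postcondition, and its loop version.
def Pdfs (g : List (List Int)) (x y : Int) (v : List (Int × Int)) : Prop :=
  (v.Nodup → (dfsA g x y v).val.2.Nodup) ∧
  (¬ Oil g (x, y) → (dfsA g x y v).val = (0, v)) ∧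
  (Oil g (x, y) →
    (dfsA g x y v).val.1 =
      1 + (((dfsA g x y v).val.2.drop v.length).countP fun p => oilB g p.1 p.2) ∧
    (∀ d ∈ dirsA, (x + d.1, y + d.2) ∈ (dfsA g x y v).val.2) ∧
    (∀ p ∈ (dfsA g x y v).val.2.drop v.length,
       (Oil g p → ReachP g (x, y) p ∧
          ∀ d ∈ dirsA, (p.1 + d.1, p.2 + d.2) ∈ (dfsA g x y v).val.2) ∧
       ∃ s, AdjP s p ∧
         (s = (x, y) ∨ (s ∈ (dfsA g x y v).val.2.drop v.length ∧ Oil g s))))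

-- ==== list utilities ====
theorem drop_chain {α : Type} (v w1 w2 : List α) (h1 : v <+: w1) (h2 : w1 <+: w2) :
    w2.drop v.length = w1.drop v.length ++ w2.drop w1.length := by
  obtain ⟨t, rfl⟩ := h2
  obtain ⟨u, rfl⟩ := h1
  rw [List.drop_left]
  rw [List.drop_append_of_le_length (by simp)]
  simp

theorem mem_drop_of {α : Type} (v w : List α) (p : α) (h : v <+: w) (hp : p ∈ w) (hnp : p ∉ v) :
    p ∈ w.drop v.length := by
  obtain ⟨t, rfl⟩ := h
  rw [List.drop_left]
  rcases List.mem_append.1 hp with h | h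
  · exact absurd h hnp
  · exact h

theorem not_mem_drop_of_nodup {α : Type} (v w : List α) (p : α) (h : v <+: w) (hw : w.Nodup)
    (hp : p ∈ v) : p ∉ w.drop v.length := by
  obtain ⟨t, rfl⟩ := h
  rw [List.drop_left]
  intro hmem
  exact (List.disjoint_of_nodup_append hw) hp hmem

theorem nodup_drop_of_nodup {α : Type} (w : List α) (n : Nat) (hw : w.Nodup) : (w.drop n).Nodup :=
  hw.sublist (List.drop_sublist n w)

theorem adj_shift (x y : Int) (d : Int × Int) (hd : d ∈ dirsA) :
    AdjP (x, y) (x + d.1, y + d.2) := by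
  have e : ((x + d.1, y + d.2).1 - (x, y).1, (x + d.1, y + d.2).2 - (x, y).2) = d := by
    obtain ⟨a, b⟩ := d
    simp only [Prod.mk.injEq]
    constructor <;> ring
  unfold AdjP
  rw [e]
  exact hd

-- ==== the loop postcondition ====
def Ploop (g : List (List Int)) (x y : Int)
    (hin : 0 ≤ x ∧ x < (g.length : Int) ∧ 0 ≤ y ∧ y < ((g.headD []).length : Int))
    (ds : List (Int × Int)) (hds : ∀ d ∈ ds, d ∈ dirsA) (c : Int) (v : List (Int × Int)) : Prop :=
  (v.Nodup → (dfsLoopA g x y hin ds hds c v).val.2.Nodup) ∧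
  (dfsLoopA g x y hin ds hds c v).val.1 =
    c + (((dfsLoopA g x y hin ds hds c v).val.2.drop v.length).countP fun p => oilB g p.1 p.2) ∧
  (∀ d ∈ ds, (x + d.1, y + d.2) ∈ (dfsLoopA g x y hin ds hds c v).val.2) ∧
  (∀ p ∈ (dfsLoopA g x y hin ds hds c v).val.2.drop v.length,
     (Oil g p → ReachP g (x, y) p ∧
        ∀ d ∈ dirsA, (p.1 + d.1, p.2 + d.2) ∈ (dfsLoopA g x y hin ds hds c v).val.2) ∧
     ∃ s, AdjP s p ∧
       (s = (x, y) ∨ (s ∈ (dfsLoopA g x y hin ds hds c v).val.2.drop v.length ∧ Oil g s)))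

theorem loop_post (g : List (List Int)) (x y : Int)
    (hin : 0 ≤ x ∧ x < (g.length : Int) ∧ 0 ≤ y ∧ y < ((g.headD []).length : Int))
    (hq : Oil g (x, y)) :
    ∀ (ds : List (Int × Int)) (hds : ∀ d ∈ ds, d ∈ dirsA) (c : Int) (v : List (Int × Int)),
      (∀ (x' y' : Int) (v' : List (Int × Int)), freeA g v' < freeA g v → Pdfs g x' y' v') →
      Ploop g x y hin ds hds c v := by
  intro ds
  induction ds with
  | nil =>
    intro hds c v _
    unfold Ploop
    rw [dfsLoopA]
    simp
  | cons d rest ih =>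
    intro hds c v H
    unfold Ploop
    rw [dfsLoopA]
    by_cases hmem : (x + d.1, y + d.2) ∈ v
    · rw [dif_pos hmem]
      have := ih (fun e he => hds e (List.mem_cons_of_mem d he)) c v H
      unfold Ploop at this
      obtain ⟨h1, h2, h3, h4⟩ := this
      refine ⟨h1, h2, ?_, h4⟩
      intro e he
      rcases List.mem_cons.1 he with rfl | he'
      · exact (dfsLoopA g x y hin rest _ c v).property.subset hmem
      · exact h3 e he'
    · rw [dif_neg hmem]
      set rc := dfsA g (x + d.1) (y + d.2) (v ++ [(x + d.1, y + d.2)]) with hrc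
      obtain ⟨⟨c2, v2⟩, h2⟩ := rc
      dsimp only
      set rl := dfsLoopA g x y hin rest (fun e he => hds e (List.mem_cons_of_mem d he)) (c + c2) v2 with hrl
      obtain ⟨⟨cr, vr⟩, h3⟩ := rl
      dsimp only
      simp only at h2 h3
      -- facts
      have hdmem : d ∈ dirsA := hds d (List.mem_cons_self ..)
      have hbox : (x + d.1, y + d.2) ∈ boxA g := by
        simp only [dirsA, List.mem_cons, List.not_mem_nil, or_false] at hdmem
        rcases hdmem with rfl | rfl | rfl | rfl <;> (apply mem_boxA <;> simp only <;> omega)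
      have hfree1 : freeA g (v ++ [(x + d.1, y + d.2)]) < freeA g v :=
        freeA_append_lt g v _ hbox hmem
      have hpre1 : v <+: v ++ [(x + d.1, y + d.2)] := List.prefix_append v _
      have hPd : Pdfs g (x + d.1) (y + d.2) (v ++ [(x + d.1, y + d.2)]) := H _ _ _ hfree1
      unfold Pdfs at hPd
      rw [← hrc] at hPd
      dsimp only at hPd
      have hle2 : freeA g v2 ≤ freeA g (v ++ [(x + d.1, y + d.2)]) := freeA_le_of_prefix g _ _ h2
      have hPl : Ploop g x y hin rest (fun e he => hds e (List.mem_cons_of_mem d he)) (c + c2) v2 :=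
        ih _ (c + c2) v2 (fun x' y' v' hf => H x' y' v' (by omega))
      unfold Ploop at hPl
      rw [← hrl] at hPl
      dsimp only at hPl
      have e1 := drop_chain v (v ++ [(x + d.1, y + d.2)]) v2 hpre1 h2
      have e2 := drop_chain v v2 vr (hpre1.trans h2) h3
      rw [List.drop_left] at e1
      have hd2 : vr.drop v.length =
          [(x + d.1, y + d.2)] ++ v2.drop (v ++ [(x + d.1, y + d.2)]).length ++ vr.drop v2.length := by
        rw [e2, e1]
      have hadjn : AdjP (x, y) (x + d.1, y + d.2) := adj_shift x y d (hds d (List.mem_cons_self ..))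
      have hnmem : (x + d.1, y + d.2) ∈ vr := by
        refine h3.subset (h2.subset ?_)
        simp
      have hnmemdrop : (x + d.1, y + d.2) ∈ vr.drop v.length := by
        rw [hd2]
        simp
      obtain ⟨hPd1, hPd2, hPd3⟩ := hPd
      obtain ⟨hPl1, hPl2, hPl3, hPl4⟩ := hPl
      by_cases hOiln : Oil g (x + d.1, y + d.2)
      · -- explored an oil neighbour
        obtain ⟨hc2, hnb, hper⟩ := hPd3 hOiln
        have hstep : StepP g (x, y) (x + d.1, y + d.2) := ⟨hq, hOiln, hadjn⟩
        refine ⟨?_, ?_, ?_, ?_⟩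
        · intro hnd
          have hnd1 : (v ++ [(x + d.1, y + d.2)]).Nodup := by
            refine List.Nodup.append hnd (List.nodup_singleton _) ?_
            intro a hav han
            rw [List.mem_singleton] at han
            subst han
            exact hmem hav
          exact hPl1 (hPd1 hnd1)
        · rw [hd2]
          simp only [List.countP_append]
          have hcnt1 : List.countP (fun p => oilB g p.1 p.2) [(x + d.1, y + d.2)] = 1 := by
            simp only [List.countP_cons, List.countP_nil]
            have : oilB g (x + d.1, y + d.2).1 (x + d.1, y + d.2).2 = true := hOiln
            simp [this]
          rw [hcnt1, hPl2, hc2]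
          push_cast
          ring
        · intro d1 hd1
          rcases List.mem_cons.1 hd1 with rfl | hd1'
          · exact hnmem
          · exact hPl3 d1 hd1'
        · intro p hp
          rw [hd2] at hp
          rcases List.mem_append.1 hp with hp' | hpR
          · rcases List.mem_append.1 hp' with hpn | hpC
            · -- p is the freshly marked neighbour
              have hpn' : p = (x + d.1, y + d.2) := by simpa using hpn
              subst hpn'
              constructor
              · intro _
                refine ⟨Relation.ReflTransGen.single hstep, ?_⟩
                intro d' hd'
                exact h3.subset (hnb d' hd')
              · exact ⟨(x, y), hadjn, Or.inl rfl⟩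
            · -- p was discovered inside the recursive dfs call
              obtain ⟨hp1, hp2⟩ := hper p hpC
              constructor
              · intro hOilp
                obtain ⟨hre, hnbp⟩ := hp1 hOilp
                refine ⟨Relation.ReflTransGen.head hstep hre, ?_⟩
                intro d' hd'
                exact h3.subset (hnbp d' hd')
              · obtain ⟨s, hs1, hs2⟩ := hp2
                refine ⟨s, hs1, Or.inr ?_⟩
                rcases hs2 with rfl | ⟨hsC, hsOil⟩
                · exact ⟨hnmemdrop, hOiln⟩
                · refine ⟨?_, hsOil⟩
                  rw [hd2]
                  simp only [List.mem_append]
                  exact Or.inl (Or.inr hsC)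
          · -- p was discovered while processing the remaining directions
            obtain ⟨hp1, hp2⟩ := hPl4 p hpR
            constructor
            · exact hp1
            · obtain ⟨s, hs1, hs2⟩ := hp2
              refine ⟨s, hs1, ?_⟩
              rcases hs2 with rfl | ⟨hsR, hsOil⟩
              · exact Or.inl rfl
              · refine Or.inr ⟨?_, hsOil⟩
                rw [hd2]
                simp only [List.mem_append]
                exact Or.inr hsR
      · -- the neighbour is not oil: the child call returns immediately
        have hret := hPd2 hOiln
        have hc2 : c2 = 0 := by
          have := congrArg Prod.fst hret
          simpa using this
        have hv2 : v2 = v ++ [(x + d.1, y + d.2)] := by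
          have := congrArg Prod.snd hret
          simpa using this
        have hnewC : v2.drop (v ++ [(x + d.1, y + d.2)]).length = [] := by
          rw [hv2]
          simp
        refine ⟨?_, ?_, ?_, ?_⟩
        · intro hnd
          apply hPl1
          rw [hv2]
          refine List.Nodup.append hnd (List.nodup_singleton _) ?_
          intro a hav han
          rw [List.mem_singleton] at han
          subst han
          exact hmem hav
        · rw [hd2, hnewC]
          simp only [List.countP_append]
          have hcnt0 : List.countP (fun p => oilB g p.1 p.2) [(x + d.1, y + d.2)] = 0 := by
            simp only [List.countP_cons, List.countP_nil]
            have : oilB g (x + d.1, y + d.2).1 (x + d.1, y + d.2).2 ≠ true := hOiln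
            simp [this]
          rw [hcnt0, hPl2, hc2]
          simp
        · intro d1 hd1
          rcases List.mem_cons.1 hd1 with rfl | hd1'
          · exact hnmem
          · exact hPl3 d1 hd1'
        · intro p hp
          rw [hd2, hnewC] at hp
          rcases List.mem_append.1 hp with hp' | hpR
          · have hpn' : p = (x + d.1, y + d.2) := by simpa using hp'
            subst hpn'
            constructor
            · intro hOilp
              exact absurd hOilp hOiln
            · exact ⟨(x, y), hadjn, Or.inl rfl⟩
          · obtain ⟨hp1, hp2⟩ := hPl4 p hpR
            constructor
            · exact hp1
            · obtain ⟨s, hs1, hs2⟩ := hp2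
              refine ⟨s, hs1, ?_⟩
              rcases hs2 with rfl | ⟨hsR, hsOil⟩
              · exact Or.inl rfl
              · refine Or.inr ⟨?_, hsOil⟩
                rw [hd2, hnewC]
                simp only [List.mem_append]
                exact Or.inr hsR

theorem dfsLoopA_skip_all (g : List (List Int)) (x y : Int) (hin : 0 ≤ x ∧ x < (g.length : Int) ∧ 0 ≤ y ∧ y < ((g.headD []).length : Int))
    (ds : List (Int × Int)) (hds : ∀ d ∈ ds, d ∈ dirsA) (c : Int) (v : PySem.Set (Int × Int))
    (hall : ∀ d ∈ ds, (x + d.1, y + d.2) ∈ v) :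
    (dfsLoopA g x y hin ds hds c v).val = (c, v) := by
  induction ds with
  | nil => rw [dfsLoopA]
  | cons d rest ih =>
    rw [dfsLoopA]
    rw [dif_pos (hall d (List.mem_cons_self ..))]
    exact ih _ (fun e he => hall e (List.mem_cons_of_mem d he))

theorem oil_iff (g : List (List Int)) (x y : Int) :
    Oil g (x, y) ↔ ((0 ≤ x ∧ x < (g.length : Int) ∧ 0 ≤ y ∧ y < ((g.headD []).length : Int)) ∧
      cellA g x y = some 1) := by
  unfold Oil oilB
  simp only [cellA, Bool.and_eq_true, decide_eq_true_eq, beq_iff_eq]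
  tauto

theorem dfs_step (g : List (List Int)) (x y : Int) (v : List (Int × Int))
    (H : ∀ (x' y' : Int) (v' : List (Int × Int)), freeA g v' < freeA g v → Pdfs g x' y' v') :
    Pdfs g x y v := by
  unfold Pdfs
  rw [dfsA]
  by_cases hb : x ≤ -1 ∨ x ≥ (g.length : Int) ∨ y ≤ -1 ∨ y ≥ ((g.headD []).length : Int)
  · rw [dif_pos hb]
    refine ⟨fun h => h, fun _ => rfl, fun hq => ?_⟩
    obtain ⟨hbnd, _⟩ := (oil_iff g x y).mp hq
    omega
  · rw [dif_neg hb]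
    by_cases hc : cellA g x y = some 1
    · rw [if_pos hc]
      have hq : Oil g (x, y) := (oil_iff g x y).mpr ⟨by omega, hc⟩
      have hl := loop_post g x y (by omega) hq dirsA (fun d hd => hd) 1 v H
      unfold Ploop at hl
      obtain ⟨hl1, hl2, hl3, hl4⟩ := hl
      exact ⟨hl1, fun hno => absurd hq hno, fun _ => ⟨hl2, hl3, hl4⟩⟩
    · rw [if_neg hc]
      refine ⟨fun h => h, fun _ => rfl, fun hq => ?_⟩
      obtain ⟨_, hc'⟩ := (oil_iff g x y).mp hq
      exact absurd hc' hc

theorem dfs_post (g : List (List Int)) (x y : Int) (v : List (Int × Int)) : Pdfs g x y v := by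
  have main : ∀ (n : Nat) (x y : Int) (v : List (Int × Int)), freeA g v ≤ n → Pdfs g x y v := by
    intro n
    induction n with
    | zero =>
      intro x y v h
      exact dfs_step g x y v (fun x' y' v' hf => absurd hf (by omega))
    | succ k ih =>
      intro x y v h
      exact dfs_step g x y v (fun x' y' v' hf => ih x' y' v' (by omega))
  exact main (freeA g v) x y v le_rfl

theorem dfsA_blocked (g : List (List Int)) (x y : Int) (v : List (Int × Int))
    (hq : Oil g (x, y)) (hnb : ∀ d ∈ dirsA, (x + d.1, y + d.2) ∈ v) :
    (dfsA g x y v).val = (1, v) := by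
  obtain ⟨hbnd, hc⟩ := (oil_iff g x y).mp hq
  rw [dfsA, dif_neg (by omega), if_pos hc]
  exact dfsLoopA_skip_all g x y (by omega) dirsA _ 1 v hnb

theorem dfs_complete (g : List (List Int)) (x y : Int) (v : List (Int × Int))
    (hq : Oil g (x, y))
    (hdisj : ∀ p, ReachP g (x, y) p → Oil g p → p ∉ v) :
    ∀ p, ReachP g (x, y) p → Oil g p → p ≠ (x, y) →
      p ∈ (dfsA g x y v).val.2.drop v.length := by
  have post := dfs_post g x y v
  unfold Pdfs at post
  obtain ⟨-, -, h3⟩ := post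
  obtain ⟨-, hnb, hper⟩ := h3 hq
  intro p hr
  induction hr with
  | refl => intro _ hne; exact absurd rfl hne
  | @tail b q hr1 hstep ih =>
    intro hOilp _
    obtain ⟨hOb, hOc, hadj⟩ := hstep
    have hreach : ReachP g (x, y) q := Relation.ReflTransGen.tail hr1 ⟨hOb, hOc, hadj⟩
    have hcmem : q ∈ (dfsA g x y v).val.2 := by
      by_cases hbq : b = (x, y)
      · subst hbq
        have hd : (q.1 - x, q.2 - y) ∈ dirsA := hadj
        have he : (x + (q.1 - x), y + (q.2 - y)) = q := by
          obtain ⟨qa, qb⟩ := q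
          simp only [Prod.mk.injEq]
          constructor <;> ring
        have hmm := hnb (q.1 - x, q.2 - y) hd
        dsimp only at hmm
        rwa [he] at hmm
      · have hbdrop := ih hOb hbq
        have hd : (q.1 - b.1, q.2 - b.2) ∈ dirsA := hadj
        have he : (b.1 + (q.1 - b.1), b.2 + (q.2 - b.2)) = q := by
          obtain ⟨qa, qb⟩ := q
          simp only [Prod.mk.injEq]
          constructor <;> ring
        have hmm := ((hper b hbdrop).1 hOb).2 (q.1 - b.1, q.2 - b.2) hd
        dsimp only at hmm
        rwa [he] at hmm
    exact mem_drop_of v _ q (dfsA g x y v).property hcmem (hdisj q hreach hOilp)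

theorem adj_ne (p q : Int × Int) (h : AdjP p q) : q ≠ p := by
  intro he
  subst he
  unfold AdjP dirsA at h
  simp only [List.mem_cons, List.not_mem_nil, or_false, Prod.mk.injEq] at h
  omega

theorem adj_symm (p q : Int × Int) (h : AdjP p q) : AdjP q p := by
  unfold AdjP dirsA at *
  simp only [List.mem_cons, List.not_mem_nil, or_false, Prod.mk.injEq] at *
  omega

theorem step_symm (g : List (List Int)) : Symmetric (StepP g) := by
  intro p q ⟨h1, h2, h3⟩
  exact ⟨h2, h1, adj_symm p q h3⟩

theorem reach_symm (g : List (List Int)) (p q : Int × Int) (h : ReachP g p q) : ReachP g q p :=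
  (Relation.ReflTransGen.symmetric (step_symm g)) h

theorem dirs_same (d : Int × Int) : d ∈ dirsB ↔ d ∈ dirsA := by
  unfold dirsA dirsB
  simp only [List.mem_cons, List.not_mem_nil, or_false]
  tauto

theorem cellA_lt (g : List (List Int)) (j i : Int) (a : Int) (hj : 0 ≤ j)
    (hc : cellA g j i = some a) : j < (g.length : Int) := by
  unfold cellA at hc
  cases hrow : PySem.List.pyGet? g j with
  | none => rw [hrow] at hc; simp at hc
  | some row =>
    by_contra hge
    have hj' : j = ((j.toNat : Nat) : Int) := by omega
    rw [hj', PySem.List.pyGet?_natCast] at hrow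
    obtain ⟨hlt, -⟩ := List.getElem?_eq_some_iff.mp hrow
    omega

-- the set of oil cells connected to column i through rows < jmax
def UU (g : List (List Int)) (i jmax : Int) (p : Int × Int) : Prop :=
  Oil g p ∧ ∃ j, 0 ≤ j ∧ j < jmax ∧ Oil g (j, i) ∧ ReachP g (j, i) p

-- characterisation of A's visited set after the rows < j of column i
def VV (g : List (List Int)) (i j : Int) (p : Int × Int) : Prop :=
  (∃ s, UU g i j s ∧ AdjP s p) ∨ (∃ j', 0 ≤ j' ∧ j' < j ∧ Oil g (j', i) ∧ p = (j', i))

def InvA (g : List (List Int)) (i j : Int) (st : Int × List (Int × Int)) : Prop :=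
  (∃ l : List (Int × Int), l.Nodup ∧ (∀ p, p ∈ l ↔ UU g i j p) ∧ st.1 = (l.length : Int)) ∧
  st.2.Nodup ∧ (∀ p, p ∈ st.2 ↔ VV g i j p)

theorem UU_step (g : List (List Int)) (i j : Int) (s p : Int × Int)
    (hs : UU g i j s) (hp : Oil g p) (hadj : AdjP s p) : UU g i j p := by
  obtain ⟨hOs, j', h1, h2, h3, h4⟩ := hs
  exact ⟨hp, j', h1, h2, h3, Relation.ReflTransGen.tail h4 ⟨hOs, hp, hadj⟩⟩

theorem UU_reach (g : List (List Int)) (i j : Int) (s p : Int × Int)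
    (hs : UU g i j s) (hp : Oil g p) (hr : ReachP g s p) : UU g i j p := by
  obtain ⟨hOs, j', h1, h2, h3, h4⟩ := hs
  exact ⟨hp, j', h1, h2, h3, Relation.ReflTransGen.trans h4 hr⟩

theorem UU_sub_VV (g : List (List Int)) (i j : Int) (p : Int × Int) (h : UU g i j p) :
    VV g i j p := by
  obtain ⟨hOp, j', h1, h2, h3, h4⟩ := h
  rcases (Relation.ReflTransGen.cases_tail h4) with he | ⟨b, hb, hstep⟩
  · exact Or.inr ⟨j', h1, h2, h3, he⟩
  · exact Or.inl ⟨b, ⟨hstep.1, j', h1, h2, h3, hb⟩, hstep.2.2⟩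

theorem UU_succ_iff (g : List (List Int)) (i j : Int) (hj : 0 ≤ j) (hOq : Oil g (j, i))
    (p : Int × Int) :
    UU g i (j + 1) p ↔ (UU g i j p ∨ (Oil g p ∧ ReachP g (j, i) p)) := by
  constructor
  · rintro ⟨hOp, j', h1, h2, h3, h4⟩
    by_cases hje : j' = j
    · subst hje
      exact Or.inr ⟨hOp, h4⟩
    · exact Or.inl ⟨hOp, j', h1, by omega, h3, h4⟩
  · rintro (⟨hOp, j', h1, h2, h3, h4⟩ | ⟨hOp, hr⟩)
    · exact ⟨hOp, j', h1, by omega, h3, h4⟩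
    · exact ⟨hOp, j, hj, by omega, hOq, hr⟩

theorem UU_succ_iff_no (g : List (List Int)) (i j : Int) (hnq : ¬ Oil g (j, i))
    (p : Int × Int) : UU g i (j + 1) p ↔ UU g i j p := by
  constructor
  · rintro ⟨hOp, j', h1, h2, h3, h4⟩
    refine ⟨hOp, j', h1, ?_, h3, h4⟩
    by_cases hje : j' = j
    · subst hje; exact absurd h3 hnq
    · omega
  · rintro ⟨hOp, j', h1, h2, h3, h4⟩
    exact ⟨hOp, j', h1, by omega, h3, h4⟩

theorem UU_mono (g : List (List Int)) (i j : Int) (p : Int × Int) (h : UU g i j p) :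
    UU g i (j + 1) p := by
  obtain ⟨hOp, j', h1, h2, h3, h4⟩ := h
  exact ⟨hOp, j', h1, by omega, h3, h4⟩

theorem VV_mono (g : List (List Int)) (i j : Int) (p : Int × Int) (h : VV g i j p) :
    VV g i (j + 1) p := by
  rcases h with ⟨s, hs, hadj⟩ | ⟨j', h1, h2, h3, h4⟩
  · exact Or.inl ⟨s, UU_mono g i j s hs, hadj⟩
  · exact Or.inr ⟨j', h1, by omega, h3, h4⟩

theorem pair_shift (a b : Int) (p : Int × Int) : (a + (p.1 - a, p.2 - b).1, b + (p.1 - a, p.2 - b).2) = p := by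
  obtain ⟨c, d⟩ := p
  simp only [Prod.mk.injEq]
  constructor <;> ring

theorem rowStep_inv (g : List (List Int)) (i j : Int) (st : Int × List (Int × Int))
    (hj : 0 ≤ j) (hi : 0 ≤ i) (hiW : i < ((g.headD []).length : Int))
    (hinv : InvA g i j st) : InvA g i (j + 1) (rowStepA g i st j) := by
  obtain ⟨⟨l, hlnd, hlmem, hlen⟩, hvnd, hvmem⟩ := hinv
  unfold rowStepA
  by_cases hc : cellA g j i = some 1
  case neg =>
    rw [if_neg hc]
    have hnq : ¬ Oil g (j, i) := fun hOq => hc ((oil_iff g j i).mp hOq).2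
    refine ⟨⟨l, hlnd, ?_, hlen⟩, hvnd, ?_⟩
    · intro p
      rw [UU_succ_iff_no g i j hnq p]
      exact hlmem p
    · intro p
      rw [hvmem p]
      unfold VV
      constructor
      · rintro (⟨s, hs, hadj⟩ | ⟨j', h1, h2, h3, h4⟩)
        · exact Or.inl ⟨s, (UU_succ_iff_no g i j hnq s).symm.mp hs, hadj⟩
        · exact Or.inr ⟨j', h1, by omega, h3, h4⟩
      · rintro (⟨s, hs, hadj⟩ | ⟨j', h1, h2, h3, h4⟩)
        · exact Or.inl ⟨s, (UU_succ_iff_no g i j hnq s).mp hs, hadj⟩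
        · refine Or.inr ⟨j', h1, ?_, h3, h4⟩
          by_cases hje : j' = j
          · subst hje; exact absurd h3 hnq
          · omega
  case pos =>
    rw [if_pos hc]
    dsimp only
    have hjH : j < (g.length : Int) := cellA_lt g j i 1 hj hc
    have hOq : Oil g (j, i) := (oil_iff g j i).mpr ⟨⟨hj, hjH, hi, hiW⟩, hc⟩
    by_cases hqU : UU g i j (j, i)
    case pos =>
      -- the component was already counted from an earlier row of this column
      have hqv : (j, i) ∈ st.2 := (hvmem _).mpr (UU_sub_VV _ _ _ _ hqU)
      have hnb : ∀ d ∈ dirsA, (j + d.1, i + d.2) ∈ st.2 := by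
        intro d hd
        exact (hvmem _).mpr (Or.inl ⟨(j, i), hqU, adj_shift j i d hd⟩)
      have hblk := dfsA_blocked g j i st.2 hOq hnb
      have hb1 : (dfsA g j i st.2).val.1 = 1 := by rw [hblk]
      have hb2 : (dfsA g j i st.2).val.2 = st.2 := by rw [hblk]
      rw [hb1, hb2, PySem.Set.add_of_mem hqv, if_neg (fun hcon => hcon.2 hqv)]
      have hUeq : ∀ p, UU g i (j + 1) p ↔ UU g i j p := by
        intro p
        rw [UU_succ_iff g i j hj hOq p]
        constructor
        · rintro (h | ⟨hOp, hr⟩)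
          · exact h
          · exact UU_reach g i j (j, i) p hqU hOp hr
        · exact Or.inl
      refine ⟨⟨l, hlnd, ?_, ?_⟩, hvnd, ?_⟩
      · intro p
        rw [hUeq p]
        exact hlmem p
      · dsimp only
        omega
      · intro p
        dsimp only
        rw [hvmem p]
        unfold VV
        constructor
        · rintro (⟨s, hs, hadj⟩ | ⟨j', h1, h2, h3, h4⟩)
          · exact Or.inl ⟨s, (hUeq s).mpr hs, hadj⟩
          · exact Or.inr ⟨j', h1, by omega, h3, h4⟩
        · rintro (⟨s, hs, hadj⟩ | ⟨j', h1, h2, h3, h4⟩)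
          · exact Or.inl ⟨s, (hUeq s).mp hs, hadj⟩
          · by_cases hje : j' = j
            · subst hje
              have hmm : p ∈ st.2 := by rw [h4]; exact hqv
              rw [hvmem p] at hmm
              exact hmm
            · exact Or.inr ⟨j', h1, by omega, h3, h4⟩
    case neg =>
      -- a component seen for the first time: the dfs explores it fully
      have hdisj : ∀ p, ReachP g (j, i) p → Oil g p → p ∉ st.2 := by
        intro p hr hOp hpv
        rcases (hvmem p).mp hpv with ⟨s, hsU, hadj⟩ | ⟨j', h1, h2, h3, he⟩
        · exact hqU (UU_reach g i j p (j, i) (UU_step g i j s p hsU hOp hadj) hOq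
            (reach_symm g (j, i) p hr))
        · subst he
          exact hqU (UU_reach g i j (j', i) (j, i) ⟨h3, j', h1, h2, h3, .refl⟩ hOq
            (reach_symm _ _ _ hr))
      have post := dfs_post g j i st.2
      unfold Pdfs at post
      obtain ⟨hndf, -, h3⟩ := post
      obtain ⟨hcnt, hnb, hper⟩ := h3 hOq
      have hrnd : (dfsA g j i st.2).val.2.Nodup := hndf hvnd
      obtain ⟨tl, htl⟩ := (dfsA g j i st.2).property
      have hdropt : (dfsA g j i st.2).val.2.drop st.2.length = tl := by
        rw [← htl, List.drop_left]
      have hndtl : tl.Nodup := by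
        rw [← hdropt]
        exact nodup_drop_of_nodup _ _ hrnd
      have hwmem : ∀ p, p ∈ (dfsA g j i st.2).val.2 ↔ (p ∈ st.2 ∨ p ∈ tl) := by
        intro p
        rw [← htl, List.mem_append]
      have hstdisj : ∀ p ∈ st.2, p ∉ tl := by
        intro p hp
        rw [← hdropt]
        exact not_mem_drop_of_nodup st.2 _ p (dfsA g j i st.2).property hrnd hp
      have hqnotv : (j, i) ∉ st.2 := hdisj _ .refl hOq
      have hsound : ∀ p ∈ tl, Oil g p → ReachP g (j, i) p := by
        intro p hp hOp
        exact (((hper p) (by rw [hdropt]; exact hp)).1 hOp).1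
      have hcompl : ∀ p, ReachP g (j, i) p → Oil g p → p ≠ (j, i) → p ∈ tl := by
        intro p h1 h2 h3
        rw [← hdropt]
        exact dfs_complete g j i st.2 hOq hdisj p h1 h2 h3
      have hnbw : ∀ s, Oil g s → ReachP g (j, i) s → ∀ p, AdjP s p →
          p ∈ (dfsA g j i st.2).val.2 := by
        intro s hOs hrs p hadj
        have hd : (p.1 - s.1, p.2 - s.2) ∈ dirsA := hadj
        by_cases hsq : s = (j, i)
        · subst hsq
          have hmm := hnb (p.1 - j, p.2 - i) hd
          dsimp only at hmm
          rwa [pair_shift j i p] at hmm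
        · have hsnew : s ∈ tl := hcompl s hrs hOs hsq
          have hmm := (((hper s) (by rw [hdropt]; exact hsnew)).1 hOs).2 (p.1 - s.1, p.2 - s.2) hd
          dsimp only at hmm
          rwa [pair_shift s.1 s.2 p] at hmm
      rw [hdropt] at hcnt
      by_cases hA : ∃ b, Oil g b ∧ ReachP g (j, i) b ∧ b ≠ (j, i)
      case pos =>
        -- the component has at least two cells, so (j, i) itself was re-marked
        obtain ⟨b, hOb, hrb, hneb⟩ := hA
        rcases Relation.ReflTransGen.cases_head hrb with he | ⟨b0, hstep0, hr0⟩
        · exact absurd he.symm hneb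
        · have hOb0 : Oil g b0 := hstep0.2.1
          have hqw : (j, i) ∈ (dfsA g j i st.2).val.2 :=
            hnbw b0 hOb0 (Relation.ReflTransGen.single hstep0) (j, i)
              (adj_symm _ _ hstep0.2.2)
          have hqnew : (j, i) ∈ tl := by
            rcases (hwmem _).mp hqw with h | h
            · exact absurd h hqnotv
            · exact h
          rw [if_neg (fun hcon => hcon.2 hqw), PySem.Set.add_of_mem hqw]
          have hUeq : ∀ p, UU g i (j + 1) p ↔ (UU g i j p ∨ (p ∈ tl ∧ Oil g p)) := by
            intro p
            rw [UU_succ_iff g i j hj hOq p]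
            constructor
            · rintro (h | ⟨hOp, hr⟩)
              · exact Or.inl h
              · by_cases hpq : p = (j, i)
                · subst hpq; exact Or.inr ⟨hqnew, hOp⟩
                · exact Or.inr ⟨hcompl p hr hOp hpq, hOp⟩
            · rintro (h | ⟨hp, hOp⟩)
              · exact Or.inl h
              · exact Or.inr ⟨hOp, hsound p hp hOp⟩
          refine ⟨⟨l ++ tl.filter (fun p => oilB g p.1 p.2), ?_, ?_, ?_⟩, hrnd, ?_⟩
          · refine List.Nodup.append hlnd (hndtl.filter _) ?_
            intro a ha hamem
            have haU : UU g i j a := (hlmem a).mp ha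
            have hast : a ∈ st.2 := (hvmem a).mpr (UU_sub_VV _ _ _ _ haU)
            exact hstdisj a hast (List.mem_of_mem_filter hamem)
          · intro p
            rw [List.mem_append, List.mem_filter, hUeq p, hlmem p]
            constructor
            · rintro (h | ⟨h1, h2⟩)
              · exact Or.inl h
              · exact Or.inr ⟨h1, h2⟩
            · rintro (h | ⟨h1, h2⟩)
              · exact Or.inl h
              · exact Or.inr ⟨h1, h2⟩
          · dsimp only
            rw [hcnt, hlen, List.length_append, List.countP_eq_length_filter]
            push_cast
            omega
          · intro p
            dsimp only
            rw [hwmem p]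
            constructor
            · rintro (h | h)
              · exact VV_mono g i j p ((hvmem p).mp h)
              · obtain ⟨-, s, hadj, hs⟩ := hper p (by rw [hdropt]; exact h)
                rcases hs with rfl | ⟨hsnew, hOs⟩
                · exact Or.inl ⟨(j, i), (hUeq _).mpr (Or.inr ⟨hqnew, hOq⟩), hadj⟩
                · exact Or.inl ⟨s, (hUeq s).mpr (Or.inr ⟨by rwa [hdropt] at hsnew, hOs⟩), hadj⟩
            · rintro (⟨s, hs, hadj⟩ | ⟨j', h1, h2, h3, he⟩)
              · rcases (hUeq s).mp hs with hUs | ⟨hsnew, hOs⟩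
                · exact Or.inl ((hvmem p).mpr (Or.inl ⟨s, hUs, hadj⟩))
                · exact (hwmem p).mp (hnbw s hOs (hsound s hsnew hOs) p hadj)
              · subst he
                by_cases hje : j' = j
                · rw [hje]; exact Or.inr hqnew
                · exact Or.inl ((hvmem _).mpr (Or.inr ⟨j', h1, by omega, h3, rfl⟩))
      case neg =>
        -- the component is the single cell (j, i)
        have hnooil : ∀ p ∈ tl, ¬ Oil g p := by
          intro p hp hOp
          have hrp := hsound p hp hOp
          by_cases hpq : p = (j, i)
          · obtain ⟨-, s, hadj, hs⟩ := hper p (by rw [hdropt]; exact hp)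
            rcases hs with hsq | ⟨hsnew, hOs⟩
            · rw [hpq] at hadj
              rw [hsq] at hadj
              exact adj_ne _ _ hadj rfl
            · refine hA ⟨s, hOs, hsound s (by rwa [hdropt] at hsnew) hOs, ?_⟩
              intro hse
              rw [hse, hpq] at hadj
              exact adj_ne _ _ hadj rfl
          · exact hA ⟨p, hOp, hrp, hpq⟩
        have hcnt0 : tl.countP (fun p => oilB g p.1 p.2) = 0 := by
          rw [List.countP_eq_zero]
          intro p hp
          exact fun h => hnooil p hp h
        have hqnw : (j, i) ∉ (dfsA g j i st.2).val.2 := by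
          rw [hwmem]
          rintro (h | h)
          · exact hqnotv h
          · exact hnooil _ h hOq
        have hcond : ((dfsA g j i st.2).val.1 - 1 = 0 ∧ (j, i) ∉ (dfsA g j i st.2).val.2) :=
          ⟨by rw [hcnt, hcnt0]; simp, hqnw⟩
        rw [if_pos hcond, PySem.Set.add_of_not_mem hqnw]
        have hUeq : ∀ p, UU g i (j + 1) p ↔ (UU g i j p ∨ p = (j, i)) := by
          intro p
          rw [UU_succ_iff g i j hj hOq p]
          constructor
          · rintro (h | ⟨hOp, hr⟩)
            · exact Or.inl h
            · by_cases hpq : p = (j, i)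
              · exact Or.inr hpq
              · exact absurd ⟨p, hOp, hr, hpq⟩ hA
          · rintro (h | rfl)
            · exact Or.inl h
            · exact Or.inr ⟨hOq, .refl⟩
        refine ⟨⟨l ++ [(j, i)], ?_, ?_, ?_⟩, ?_, ?_⟩
        · refine List.Nodup.append hlnd (List.nodup_singleton _) ?_
          intro a ha hamem
          rw [List.mem_singleton] at hamem
          subst hamem
          exact hqU ((hlmem _).mp ha)
        · intro p
          rw [List.mem_append, List.mem_singleton, hUeq p, hlmem p]
        · dsimp only
          rw [hcnt, hcnt0, hlen]
          simp only [List.length_append, List.length_singleton]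
          push_cast
          omega
        · refine List.Nodup.append hrnd (List.nodup_singleton _) ?_
          intro a ha hamem
          rw [List.mem_singleton] at hamem
          subst hamem
          exact hqnw ha
        · intro p
          dsimp only
          rw [List.mem_append, List.mem_singleton, hwmem p]
          constructor
          · rintro ((h | h) | rfl)
            · exact VV_mono g i j p ((hvmem p).mp h)
            · obtain ⟨-, s, hadj, hs⟩ := hper p (by rw [hdropt]; exact h)
              rcases hs with rfl | ⟨hsnew, hOs⟩
              · exact Or.inl ⟨(j, i), (hUeq _).mpr (Or.inr rfl), hadj⟩
              · exact absurd hOs (hnooil s (by rwa [hdropt] at hsnew))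
            · exact Or.inr ⟨j, hj, by omega, hOq, rfl⟩
          · rintro (⟨s, hs, hadj⟩ | ⟨j', h1, h2, h3, he⟩)
            · rcases (hUeq s).mp hs with hUs | rfl
              · exact Or.inl (Or.inl ((hvmem p).mpr (Or.inl ⟨s, hUs, hadj⟩)))
              · exact Or.inl ((hwmem p).mp (hnbw (j, i) hOq .refl p hadj))
            · subst he
              by_cases hje : j' = j
              · rw [hje]; exact Or.inr rfl
              · exact Or.inl (Or.inl ((hvmem _).mpr (Or.inr ⟨j', h1, by omega, h3, rfl⟩)))

theorem colA_val (g : List (List Int)) (i : Int) (hi : 0 ≤ i)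
    (hiW : i < ((g.headD []).length : Int)) :
    ∃ l : List (Int × Int), l.Nodup ∧ (∀ p, p ∈ l ↔ UU g i (g.length : Int) p) ∧
      ((PySem.List.pyRange 0 (g.length : Int) 1).foldl (rowStepA g i) (0, PySem.Set.empty)).1 =
        (l.length : Int) := by
  have main : ∀ n : Nat, (n : Int) ≤ (g.length : Int) →
      InvA g i (n : Int)
        ((PySem.List.pyRange 0 (n : Int) 1).foldl (rowStepA g i) (0, PySem.Set.empty)) := by
    intro n
    induction n with
    | zero =>
      intro _
      rw [show ((0 : Nat) : Int) = 0 from rfl, PySem.List.pyRange_one_eq_nil le_rfl]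
      refine ⟨⟨[], List.nodup_nil, ?_, rfl⟩, List.nodup_nil, ?_⟩
      · intro p
        simp only [List.not_mem_nil, false_iff]
        rintro ⟨-, j', h1, h2, -⟩
        omega
      · intro p
        simp only [List.foldl_nil]
        constructor
        · intro h
          exact absurd h (List.not_mem_nil)
        · rintro (⟨s, ⟨-, j', h1, h2, -⟩, -⟩ | ⟨j', h1, h2, -⟩) <;> omega
    | succ k ih =>
      intro hk
      have hcast : ((k + 1 : Nat) : Int) = (k : Int) + 1 := by push_cast; ring
      rw [hcast, PySem.List.pyRange_one_succ_right (by omega : (0:Int) ≤ (k:Int)), List.foldl_append,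
        List.foldl_cons, List.foldl_nil]
      exact rowStep_inv g i (k : Int) _ (by omega) hi hiW (ih (by omega))
  obtain ⟨⟨l, h1, h2, h3⟩, -, -⟩ := main g.length le_rfl
  exact ⟨l, h1, h2, h3⟩

-- ==== B-side: the saturation loop computes the cells connected to column i ====
def colReach (g : List (List Int)) (i : Int) (p : Int × Int) : Prop :=
  Oil g p ∧ ∃ j, Oil g (j, i) ∧ ReachP g (j, i) p

theorem reach_in_closed (g : List (List Int)) (S : PySem.Set (Int × Int))
    (hclosed : ∀ p ∈ expandB g S, p ∈ S) :
    ∀ a b, ReachP g a b → a ∈ S → b ∈ S := by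
  intro a b hr
  induction hr with
  | refl => exact id
  | @tail m q h1 hstep ih =>
    intro haS
    obtain ⟨hOm, hOq, hadj⟩ := hstep
    have hmS : m ∈ S := ih haS
    apply hclosed
    apply (PySem.Set.mem_union ..).mpr
    refine Or.inr (List.mem_flatMap.mpr ⟨m, hmS, List.mem_filterMap.mpr
      ⟨(q.1 - m.1, q.2 - m.2), (dirs_same _).mpr hadj, ?_⟩⟩)
    rw [if_pos ?_]
    · rw [pair_shift m.1 m.2 q]
    · have : (m.1 + (q.1 - m.1, q.2 - m.2).1, m.2 + (q.1 - m.1, q.2 - m.2).2) = q :=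
        pair_shift m.1 m.2 q
      rw [show m.1 + (q.1 - m.1, q.2 - m.2).1 = q.1 by dsimp only; ring,
        show m.2 + (q.1 - m.1, q.2 - m.2).2 = q.2 by dsimp only; ring]
      exact hOq

theorem expandB_sound (g : List (List Int)) (i : Int) (S : PySem.Set (Int × Int))
    (hsound : ∀ p ∈ S, colReach g i p) : ∀ p ∈ expandB g S, colReach g i p := by
  intro p hp
  rcases (PySem.Set.mem_union ..).mp hp with h | h
  · exact hsound p h
  · obtain ⟨b, hbS, hmem⟩ := List.mem_flatMap.mp h
    obtain ⟨d, hd, hif⟩ := List.mem_filterMap.mp hmem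
    by_cases ho : oilB g (b.1 + d.1) (b.2 + d.2) = true
    · rw [if_pos ho] at hif
      obtain rfl := Option.some.inj hif
      obtain ⟨hOb, jj, hOj, hrb⟩ := hsound b hbS
      have hOp : Oil g (b.1 + d.1, b.2 + d.2) := ho
      have hadj : AdjP b (b.1 + d.1, b.2 + d.2) := by
        obtain ⟨b1, b2⟩ := b
        exact adj_shift b1 b2 d ((dirs_same d).mp hd)
      exact ⟨hOp, jj, hOj, Relation.ReflTransGen.tail hrb ⟨hOb, hOp, hadj⟩⟩
    · rw [if_neg ho] at hif
      exact absurd hif (by simp)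

theorem satB_post (g : List (List Int)) (i : Int) :
    ∀ S : PySem.Set (Int × Int), S.Nodup → (∀ p ∈ S, colReach g i p) →
      (∀ j : Int, Oil g (j, i) → (j, i) ∈ S) →
      ((satB g S).Nodup ∧ ∀ p, p ∈ satB g S ↔ colReach g i p) := by
  have main : ∀ (n : Nat) (S : PySem.Set (Int × Int)), freeB g S ≤ n → S.Nodup →
      (∀ p ∈ S, colReach g i p) → (∀ j : Int, Oil g (j, i) → (j, i) ∈ S) →
      ((satB g S).Nodup ∧ ∀ p, p ∈ satB g S ↔ colReach g i p) := by
    intro n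
    induction n with
    | zero =>
      intro S hfree hnd hsound hsrc
      rw [satB]
      by_cases heq : PySem.Set.equal (expandB g S) S = true
      · rw [if_pos heq]
        refine ⟨hnd, fun p => ⟨hsound p, ?_⟩⟩
        rintro ⟨hOp, jj, hOj, hr⟩
        exact reach_in_closed g S (fun q hq => ((PySem.Set.equal_iff ..).mp heq q).mp hq)
          (jj, i) p hr (hsrc jj hOj) 
      · exfalso
        have := satB_dec g S (by rwa [← Bool.not_eq_true])
        omega
    | succ k ih =>
      intro S hfree hnd hsound hsrc
      rw [satB]
      by_cases heq : PySem.Set.equal (expandB g S) S = true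
      · rw [if_pos heq]
        refine ⟨hnd, fun p => ⟨hsound p, ?_⟩⟩
        rintro ⟨hOp, jj, hOj, hr⟩
        exact reach_in_closed g S (fun q hq => ((PySem.Set.equal_iff ..).mp heq q).mp hq)
          (jj, i) p hr (hsrc jj hOj)
      · rw [if_neg heq]
        have hdec := satB_dec g S (by rwa [← Bool.not_eq_true])
        refine ih (expandB g S) (by omega) (PySem.Set.nodup_union _ _ hnd)
          (expandB_sound g i S hsound) ?_
        intro j hOj
        exact (PySem.Set.mem_union ..).mpr (Or.inl (hsrc j hOj))
  intro S hnd hsound hsrc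
  exact main (freeB g S) S le_rfl hnd hsound hsrc

theorem colStart_facts (g : List (List Int)) (i : Int) (hi : 0 ≤ i)
    (hiW : i < ((g.headD []).length : Int)) :
    (colStartB g i).Nodup ∧ (∀ p ∈ colStartB g i, colReach g i p) ∧
      (∀ j : Int, Oil g (j, i) → (j, i) ∈ colStartB g i) := by
  refine ⟨PySem.Set.nodup_ofList _, ?_, ?_⟩
  · intro p hp
    obtain ⟨j, hj, rfl⟩ := List.mem_map.mp ((PySem.Set.mem_ofList ..).mp hp)
    obtain ⟨hjr, hcb⟩ := List.mem_filter.mp hj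
    rw [PySem.List.mem_pyRange_one] at hjr
    have hcb' : cellA g j i = some 1 := by simpa using hcb
    have hOq : Oil g (j, i) := (oil_iff g j i).mpr ⟨⟨hjr.1, hjr.2, hi, hiW⟩, hcb'⟩
    exact ⟨hOq, j, hOq, .refl⟩
  · intro j hOj
    obtain ⟨⟨h1, h2, -, -⟩, hc⟩ := (oil_iff g j i).mp hOj
    apply (PySem.Set.mem_ofList ..).mpr
    apply List.mem_map.mpr
    refine ⟨j, List.mem_filter.mpr ⟨PySem.List.mem_pyRange_one.mpr ⟨h1, h2⟩, ?_⟩, rfl⟩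
    simpa using hc

theorem UU_top_iff (g : List (List Int)) (i : Int) (p : Int × Int) :
    UU g i (g.length : Int) p ↔ colReach g i p := by
  constructor
  · rintro ⟨hOp, j, h1, h2, h3, h4⟩
    exact ⟨hOp, j, h3, h4⟩
  · rintro ⟨hOp, j, hOj, hr⟩
    obtain ⟨⟨h1, h2, -, -⟩, -⟩ := (oil_iff g j i).mp hOj
    exact ⟨hOp, j, h1, h2, hOj, hr⟩

theorem col_eq (g : List (List Int)) (i : Int) (hi : 0 ≤ i)
    (hiW : i < ((g.headD []).length : Int)) :
    ((PySem.List.pyRange 0 (g.length : Int) 1).foldl (rowStepA g i) (0, PySem.Set.empty)).1 =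
      ((satB g (colStartB g i)).length : Int) := by
  obtain ⟨l, hlnd, hlmem, hlen⟩ := colA_val g i hi hiW
  obtain ⟨h1, h2, h3⟩ := colStart_facts g i hi hiW
  obtain ⟨hSnd, hSmem⟩ := satB_post g i (colStartB g i) h1 h2 h3
  rw [hlen]
  congr 1
  have hperm : l.Perm (satB g (colStartB g i)) :=
    (List.perm_ext_iff_of_nodup hlnd hSnd).mpr
      (fun p => by rw [hlmem p, hSmem p, UU_top_iff])
  exact hperm.length_eq

theorem final_eq (land : List (List Int)) : solution land = solution_alt land := by
  unfold solution solution_alt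
  have hgen : ∀ (L : List Int) (acc : Int),
      (∀ i ∈ L, 0 ≤ i ∧ i < ((land.headD []).length : Int)) →
      L.foldl (fun ans i => max ((PySem.List.pyRange 0 (land.length : Int) 1).foldl
          (rowStepA land i) (0, PySem.Set.empty)).1 ans) acc
        = L.foldl (fun best i => max best ((satB land (colStartB land i)).length : Int)) acc := by
    intro L
    induction L with
    | nil => intro acc _; rfl
    | cons a t ih =>
      intro acc hmem
      rw [List.foldl_cons, List.foldl_cons,
        col_eq land a (hmem a (List.mem_cons_self ..)).1 (hmem a (List.mem_cons_self ..)).2,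
        max_comm]
      exact ih _ (fun i hi => hmem i (List.mem_cons_of_mem a hi))
  exact hgen _ (-1) (fun i hi => PySem.List.mem_pyRange_one.mp hi)

-- ===== VERDICT (by name: the statement is the Claim_ definition above) =====
theorem solution_spec : Claim_equal_solution := by
  intro land _ _
  unfold Spec_solution
  exact final_eq land
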